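-- pv_equiv track=rewrite | github.com/k-onoue/lukasiewicz_1 | src/setup_problem_dual.py | _split_neg_idx_list
-- ===== SOURCE A (Python) =====
-- from typing import List, Dict, Tuple, Union
--
-- def _split_neg_idx_list(idx_list) -> List[List[int]]:
--     """
--     インデックスリストを連続する部分リストに分割する
--     """
--     result = []
--     tmp = []
--
--     for i in range(len(idx_list)):
--         if not tmp or idx_list[i] == tmp[-1] + 1:
--             tmp.append(idx_list[i])
--         else:
--             result.append(tmp)
--             tmp = [idx_list[i]]
--
--     if tmp:
--         result.append(tmp)
--
--     return result
-- ===== SOURCE B (Python) =====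
-- from typing import List
--
-- def _split_neg_idx_list(idx_list) -> List[List[int]]:
--     """
--     インデックスリストを連続する部分リストに分割する
--     (staged: compute all run-boundary positions first, then slice between them)
--     """
--     n = len(idx_list)
--     if n == 0:
--         return []
--     cuts = [0] + [i for i in range(1, n) if idx_list[i] != idx_list[i - 1] + 1] + [n]
--     return [idx_list[a:b] for a, b in zip(cuts, cuts[1:])]
-- ===== Notes on version B (the rewrite author's own statement) =====
-- stated objective: alternative
-- what changed: Replaces A's one-pass running-buffer state machine with two staged passes: first collect all run-boundary positions into a cut list, then slice the input between consecutive cuts.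
import Mathlib
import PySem

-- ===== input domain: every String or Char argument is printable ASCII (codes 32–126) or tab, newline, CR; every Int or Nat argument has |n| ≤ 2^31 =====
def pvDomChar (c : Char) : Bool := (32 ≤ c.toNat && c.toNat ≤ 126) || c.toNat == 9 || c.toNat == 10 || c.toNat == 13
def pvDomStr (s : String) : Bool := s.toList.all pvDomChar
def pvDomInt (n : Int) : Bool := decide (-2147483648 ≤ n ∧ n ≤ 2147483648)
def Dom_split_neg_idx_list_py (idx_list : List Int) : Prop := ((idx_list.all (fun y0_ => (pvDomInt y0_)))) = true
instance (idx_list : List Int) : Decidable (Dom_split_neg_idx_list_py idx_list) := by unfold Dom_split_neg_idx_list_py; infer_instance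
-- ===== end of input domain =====

-- B replaces A's running-buffer state machine by two staged passes (collect all run-boundary
-- positions first, then slice between consecutive boundaries); return values proved equal on all inputs.

-- ===== PORT A =====
-- loop body of A (state = (result, tmp), x = idx_list[i]); `tmp[-1]` is pyGetD tmp (-1)
-- (the default 0 is never read: the branch is short-circuited by `not tmp`)
def pvStepA (st : List (List Int) × List Int) (x : Int) : List (List Int) × List Int :=
  if st.2 = [] ∨ x = PySem.List.pyGetD st.2 (-1) 0 + 1 then (st.1, st.2 ++ [x])
  else (st.1 ++ [st.2], [x])

-- the tail of A: `if tmp: result.append(tmp); return result`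
def pvFlushA (st : List (List Int) × List Int) : List (List Int) :=
  if st.2 = [] then st.1 else st.1 ++ [st.2]

def split_neg_idx_list_py (idx_list : List Int) : List (List Int) :=
  pvFlushA ((PySem.List.pyRange 0 (PySem.List.len idx_list)).foldl
    (fun st i => pvStepA st (PySem.List.pyGetD idx_list i 0)) ([], []))

-- ===== PORT B =====
-- Source B: if len(idx_list) == 0: return []
--       cuts = [0] + [i for i in range(1, n) if idx_list[i] != idx_list[i-1] + 1] + [n]
--       return [idx_list[a:b] for a, b in zip(cuts, cuts[1:])]
def split_neg_idx_list_py_alt (idx_list : List Int) : List (List Int) :=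
  if PySem.List.len idx_list = 0 then []
  else
    let cuts : List Int :=
      [0] ++ (PySem.List.pyRange 1 (PySem.List.len idx_list)).filter
        (fun i => !(PySem.List.pyGetD idx_list i 0 == PySem.List.pyGetD idx_list (i - 1) 0 + 1))
      ++ [PySem.List.len idx_list]
    (cuts.zip (PySem.List.slice cuts (some 1) none)).map
      (fun ab => PySem.List.slice idx_list (some ab.1) (some ab.2))

-- ===== PRECONDITION & SPEC =====
def Spec_split_neg_idx_list_py (idx_list : List Int) (out : List (List Int)) : Prop := out = split_neg_idx_list_py_alt idx_list
instance (idx_list : List Int) (out : List (List Int)) : Decidable (Spec_split_neg_idx_list_py idx_list out) := by unfold Spec_split_neg_idx_list_py; infer_instance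

-- ===== CLAIM (what is proved, stated in full; the proofs are below) =====
def Claim_equal_split_neg_idx_list_py : Prop := ∀ (idx_list : List Int), Dom_split_neg_idx_list_py idx_list → Spec_split_neg_idx_list_py idx_list (split_neg_idx_list_py idx_list)

-- ===== LEMMAS AND PROOFS =====

-- common reference shape: chop xs into maximal runs; cur = current run reversed, t = its last value
def pvChop (t : Int) (cur : List Int) : List Int → List (List Int)
  | [] => [cur.reverse]
  | y :: ys =>
    if y = t + 1 then pvChop y (y :: cur) ys
    else cur.reverse :: pvChop y [y] ys

-- B's cut list from position i on (boundaries in [i, n) plus the final n), in Nat index form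
def pvCutsFrom (l : List Int) (i : Nat) : List Int :=
  if _h : i < l.length then
    (if l.getD i 0 = l.getD (i - 1) 0 + 1 then pvCutsFrom l (i + 1)
     else (i : Int) :: pvCutsFrom l (i + 1))
  else [(l.length : Int)]
termination_by l.length - i

lemma pvGetLast_append (l : List Int) (y : Int) :
    PySem.List.pyGetD (l ++ [y]) (-1) 0 = y := by
  simp [PySem.List.pyGetD, PySem.List.pyGet?, PySem.List.pyIdx?]

lemma pvGetLast_singleton (y : Int) : PySem.List.pyGetD [y] (-1) 0 = y := by
  simpa using pvGetLast_append [] y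

-- A's fold-then-flush is pvChop
lemma pvFoldA_eq_chop (xs : List Int) : ∀ (res : List (List Int)) (tmp : List Int),
    tmp ≠ [] →
    pvFlushA (xs.foldl pvStepA (res, tmp))
      = res ++ pvChop (PySem.List.pyGetD tmp (-1) 0) tmp.reverse xs := by
  induction xs with
  | nil =>
    intro res tmp htmp
    simp [pvFlushA, pvChop, htmp]
  | cons y ys ih =>
    intro res tmp htmp
    simp only [List.foldl_cons]
    by_cases h : y = PySem.List.pyGetD tmp (-1) 0 + 1
    · rw [show pvStepA (res, tmp) y = (res, tmp ++ [y]) by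
        simp only [pvStepA]; rw [if_pos (Or.inr h)]]
      rw [pvChop, if_pos h]
      rw [ih res (tmp ++ [y]) (by simp), pvGetLast_append]
      simp
    · rw [show pvStepA (res, tmp) y = (res ++ [tmp], [y]) by
        simp only [pvStepA]; rw [if_neg (by simp [htmp, h])]]
      rw [pvChop, if_neg h]
      rw [ih (res ++ [tmp]) [y] (by simp), pvGetLast_singleton]
      simp

-- B's boundary comprehension (with the trailing n appended) is pvCutsFrom
lemma pvFilter_eq_cutsFrom (l : List Int) : ∀ (i : Nat), 1 ≤ i →
    (PySem.List.pyRange (i : Int) (l.length : Int)).filter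
        (fun j => !(PySem.List.pyGetD l j 0 == PySem.List.pyGetD l (j - 1) 0 + 1))
      ++ [(l.length : Int)] = pvCutsFrom l i := by
  intro i h1
  by_cases hlt : i < l.length
  · have hrec := pvFilter_eq_cutsFrom l (i + 1) (by omega)
    rw [PySem.List.pyRange_one_cons (by exact_mod_cast hlt)]
    rw [show ((i : Int) + 1) = ((i + 1 : Nat) : Int) by push_cast; ring]
    rw [List.filter_cons]
    have hsub : ((i : Int) - 1) = ((i - 1 : Nat) : Int) := by
      have h1' : (1 : Nat) ≤ i := h1
      push_cast [h1']; ring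
    rw [pvCutsFrom, dif_pos hlt]
    by_cases hc : l.getD i 0 = l.getD (i - 1) 0 + 1
    · rw [if_neg (by simp [hsub, PySem.List.pyGetD_natCast, -List.getD_eq_getElem?_getD, hc]),
        if_pos hc, hrec]
    · rw [if_pos (by simp [hsub, PySem.List.pyGetD_natCast, -List.getD_eq_getElem?_getD, hc]),
        if_neg hc, ← hrec]
      simp
  · rw [pvCutsFrom, dif_neg hlt]
    rw [PySem.List.pyRange_one_eq_nil (by exact_mod_cast Nat.le_of_not_lt hlt)]
    simp
termination_by i => l.length - i

-- slicing between consecutive cuts is pvChop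
lemma pvSlices_eq_chop (l : List Int) : ∀ (i c : Nat), c < i → i ≤ l.length →
    (((c : Int) :: pvCutsFrom l i).zip (pvCutsFrom l i)).map
        (fun ab => PySem.List.slice l (some ab.1) (some ab.2))
      = pvChop (l.getD (i - 1) 0) ((l.drop c).take (i - c)).reverse (l.drop i) := by
  intro i c _hci hin
  by_cases hlt : i < l.length
  · have hdrop : l.drop i = l.getD i 0 :: l.drop (i + 1) := by
      rw [List.getD_eq_getElem l 0 hlt]
      exact List.drop_eq_getElem_cons hlt
    have htake : ∀ c' : Nat, c' ≤ i →
        (l.drop c').take (i + 1 - c') = (l.drop c').take (i - c') ++ [l.getD i 0] := by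
      intro c' hc'
      rw [show i + 1 - c' = (i - c') + 1 by omega, List.take_add_one]
      congr 1
      rw [List.getElem?_drop, show c' + (i - c') = i by omega,
        List.getElem?_eq_getElem hlt, List.getD_eq_getElem l 0 hlt]
      rfl
    rw [pvCutsFrom, dif_pos hlt]
    by_cases hc : l.getD i 0 = l.getD (i - 1) 0 + 1
    · rw [if_pos hc]
      rw [pvSlices_eq_chop l (i + 1) c (by omega) (by omega)]
      rw [hdrop, pvChop, if_pos hc]
      rw [show i + 1 - 1 = i by omega, htake c (by omega)]
      simp
    · rw [if_neg hc]
      rw [List.zip_cons_cons, List.map_cons]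
      rw [pvSlices_eq_chop l (i + 1) i (by omega) (by omega)]
      rw [hdrop, pvChop, if_neg hc]
      rw [PySem.List.slice_natCast]
      rw [show i + 1 - 1 = i by omega, show i + 1 - i = 1 by omega]
      simp
  · have hieq : i = l.length := by omega
    rw [pvCutsFrom, dif_neg hlt, hieq]
    simp only [List.zip_cons_cons, List.zip_nil_right, List.map_cons, List.map_nil]
    rw [PySem.List.slice_natCast, List.drop_length, pvChop]
    simp
termination_by i _ => l.length - i

-- ===== VERDICT (by name: the statement is the Claim_ definition above) =====
theorem split_neg_idx_list_py_spec : Claim_equal_split_neg_idx_list_py := by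
  intro idx_list _
  unfold Spec_split_neg_idx_list_py split_neg_idx_list_py split_neg_idx_list_py_alt
  rw [PySem.List.foldl_pyRange_zero_pyGetD idx_list 0 pvStepA ([], [])]
  cases idx_list with
  | nil => simp [pvFlushA, PySem.List.len]
  | cons x xs =>
    rw [if_neg (by simp [PySem.List.len]; omega)]
    simp only [List.foldl_cons]
    rw [show pvStepA ([], []) x = ([], [x]) by simp [pvStepA]]
    rw [pvFoldA_eq_chop xs [] [x] (by simp), pvGetLast_singleton]
    -- B side
    have hcuts := pvFilter_eq_cutsFrom (x :: xs) 1 (le_refl 1)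
    simp only [PySem.List.len]
    rw [show ((1 : Nat) : Int) = (1 : Int) by norm_num] at hcuts
    rw [show ([(0 : Int)] ++ (PySem.List.pyRange 1 ((x :: xs).length : Int)).filter
          (fun i => !(PySem.List.pyGetD (x :: xs) i 0 == PySem.List.pyGetD (x :: xs) (i - 1) 0 + 1))
        ++ [((x :: xs).length : Int)])
      = (0 : Int) :: pvCutsFrom (x :: xs) 1 by rw [← hcuts]; simp]
    rw [PySem.List.slice_from_one, List.tail_cons]
    have hmain := pvSlices_eq_chop (x :: xs) 1 0 (by omega) (by simp)
    rw [show ((0 : Nat) : Int) = (0 : Int) by norm_num] at hmain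
    rw [hmain]
    simp
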